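-- pv_equiv track=rewrite | github.com/Iyosinator/Competitive-Programming | Bit Manipulation/A_Can_You_XOR_to_Zero.py | solve
-- ===== SOURCE A (Python) =====
-- def solve(a):
--     xor_result = 0
--     for num in a:
--         xor_result ^= num
--
--     if xor_result == 0:
--         return 0
--
--     for i in range(1, 32):
--         result = 0
--         for j in range(len(a)):
--             result ^= (a[j] ^ i)
--         if result == 0:
--             return i
--
--     return -1
-- ===== SOURCE B (Python) =====
-- def solve(a):
--     x = 0
--     for num in a:
--         x ^= num
--     if x == 0:
--         return 0
--     if len(a) % 2 == 1 and 1 <= x <= 31: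
--         return x
--     return -1
-- ===== Notes on version B (the rewrite author's own statement) =====
-- stated objective: faster
-- what changed: Replaced A's search over all 31 candidate values of i (each re-XORing the whole array) by a single XOR pass plus an O(1) algebraic case analysis: XOR(a[j]^i) = xor_all ^ (i if len(a) is odd else 0), so the answer is xor_all when the length is odd and 1<=xor_all<=31, else -1.
import Mathlib
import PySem

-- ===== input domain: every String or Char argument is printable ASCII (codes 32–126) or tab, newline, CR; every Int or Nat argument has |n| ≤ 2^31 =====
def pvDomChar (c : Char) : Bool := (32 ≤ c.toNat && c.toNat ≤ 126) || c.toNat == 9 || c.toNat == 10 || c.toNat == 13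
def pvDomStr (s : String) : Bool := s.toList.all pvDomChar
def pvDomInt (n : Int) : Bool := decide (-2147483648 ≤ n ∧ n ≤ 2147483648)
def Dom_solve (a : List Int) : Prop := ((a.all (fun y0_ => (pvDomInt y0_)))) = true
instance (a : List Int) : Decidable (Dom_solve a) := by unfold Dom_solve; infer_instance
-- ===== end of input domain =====

-- B replaces A's 31-candidate search (each candidate re-XORs the whole array) by one XOR pass
-- plus an O(1) parity case analysis; same return value everywhere.

-- ===== PORT A =====
-- inner loop 'for j in range(len(a)): result ^= (a[j] ^ i)' (j is always in range, so the default 0 is never used)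
def innerLoopA (a : List Int) (i : Int) : Int :=
  (PySem.List.pyRange 0 (a.length : Int) 1).foldl
    (fun result j => PySem.Int.bxor result (PySem.Int.bxor (PySem.List.pyGetD a j 0) i)) 0

-- 'for i in range(1, 32): … if result == 0: return i' / fall through to 'return -1'
def searchA (a : List Int) : List Int → Int
  | [] => -1
  | i :: rest => if innerLoopA a i = 0 then i else searchA a rest

def solve (a : List Int) : Int :=
  let xorResult := a.foldl (fun r num => PySem.Int.bxor r num) 0
  if xorResult = 0 then 0
  else searchA a (PySem.List.pyRange 1 32 1)

-- ===== PORT B =====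
def solve_alt (a : List Int) : Int :=
  let x := a.foldl (fun r num => PySem.Int.bxor r num) 0
  if x = 0 then 0
  else if a.length % 2 = 1 ∧ 1 ≤ x ∧ x ≤ 31 then x else -1

-- ===== PRECONDITION & SPEC =====
def Spec_solve (a : List Int) (out : Int) : Prop := out = solve_alt a
instance (a : List Int) (out : Int) : Decidable (Spec_solve a out) := by unfold Spec_solve; infer_instance

-- ===== CLAIM (what is proved, stated in full; the proofs are below) =====
def Claim_equal_solve : Prop := ∀ (a : List Int), Dom_solve a → Spec_solve a (solve a)

-- ===== LEMMAS AND PROOFS =====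

theorem bxor_eq_xor (a b : Int) : PySem.Int.bxor a b = Int.xor a b := by
  cases a with
  | ofNat m =>
    cases b with
    | ofNat n => simp [PySem.Int.bxor, Int.xor]
    | negSucc n =>
      simp [PySem.Int.bxor, Int.xor, Int.negSucc_eq]
      rw [if_neg (by omega)]
      omega
  | negSucc m =>
    cases b with
    | ofNat n =>
      simp [PySem.Int.bxor, Int.xor, Int.negSucc_eq]
      rw [if_neg (by omega)]
      omega
    | negSucc n =>
      simp [PySem.Int.bxor, Int.xor, Int.negSucc_eq]
      rw [if_neg (by omega), if_neg (by omega)]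

theorem bxor_assoc' (a b c : Int) :
    PySem.Int.bxor (PySem.Int.bxor a b) c = PySem.Int.bxor a (PySem.Int.bxor b c) := by
  simp only [bxor_eq_xor]
  cases a <;> cases b <;> cases c <;> simp [Int.xor, Nat.xor_assoc]

theorem bxor_eq_zero_iff (x i : Int) : PySem.Int.bxor x i = 0 ↔ x = i := by
  constructor
  · intro h
    have : PySem.Int.bxor (PySem.Int.bxor x i) i = PySem.Int.bxor 0 i := by rw [h]
    rwa [bxor_assoc', PySem.Int.bxor_self, PySem.Int.bxor_zero,
      PySem.Int.bxor_comm, PySem.Int.bxor_zero] at this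
  · intro h; rw [h, PySem.Int.bxor_self]

-- pulling a constant out of the accumulator of a bxor fold
theorem foldl_bxor_acc (t : List Int) (c d : Int) :
    t.foldl PySem.Int.bxor (PySem.Int.bxor c d)
      = PySem.Int.bxor (t.foldl PySem.Int.bxor c) d := by
  induction t generalizing c with
  | nil => rfl
  | cons x t ih =>
    simp only [List.foldl_cons]
    rw [show PySem.Int.bxor (PySem.Int.bxor c d) x = PySem.Int.bxor (PySem.Int.bxor c x) d by
      rw [bxor_assoc', bxor_assoc', PySem.Int.bxor_comm d x], ih]

-- the inner loop in closed form: XOR of all elements, XORed with i once per element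
theorem foldl_bxor_shift (i : Int) (t : List Int) (c : Int) :
    t.foldl (fun r x => PySem.Int.bxor r (PySem.Int.bxor x i)) c
      = PySem.Int.bxor (t.foldl PySem.Int.bxor c) (if t.length % 2 = 0 then 0 else i) := by
  induction t generalizing c with
  | nil => simp [PySem.Int.bxor_zero]
  | cons x t ih =>
    simp only [List.foldl_cons]
    rw [show PySem.Int.bxor c (PySem.Int.bxor x i)
        = PySem.Int.bxor (PySem.Int.bxor c x) i from (bxor_assoc' c x i).symm]
    rw [ih, foldl_bxor_acc]
    rcases Nat.mod_two_eq_zero_or_one t.length with h | h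
    · rw [if_pos h, PySem.Int.bxor_zero, if_neg (by simp only [List.length_cons]; omega)]
    · rw [if_neg (by omega), if_pos (by simp only [List.length_cons]; omega),
        bxor_assoc', PySem.Int.bxor_self, PySem.Int.bxor_zero]

theorem innerLoopA_closed (a : List Int) (i : Int) :
    innerLoopA a i
      = PySem.Int.bxor (a.foldl PySem.Int.bxor 0) (if a.length % 2 = 0 then 0 else i) := by
  unfold innerLoopA
  rw [PySem.List.foldl_pyRange_pyGetD' a 0
    (fun r x => PySem.Int.bxor r (PySem.Int.bxor x i)) 0 (by norm_num)]
  exact foldl_bxor_shift i a 0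

theorem searchA_even (a : List Int) (h : a.length % 2 = 0)
    (hx : a.foldl PySem.Int.bxor 0 ≠ 0) (L : List Int) : searchA a L = -1 := by
  induction L with
  | nil => rfl
  | cons i rest ih =>
    simp only [searchA]
    rw [innerLoopA_closed, if_pos h, PySem.Int.bxor_zero, if_neg hx]
    exact ih

theorem searchA_odd (a : List Int) (h : a.length % 2 = 1) (L : List Int) :
    searchA a L = if a.foldl PySem.Int.bxor 0 ∈ L then a.foldl PySem.Int.bxor 0 else -1 := by
  induction L with
  | nil => simp [searchA]
  | cons i rest ih =>
    have hone : ¬ a.length % 2 = 0 := by omega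
    simp only [searchA, innerLoopA_closed, if_neg hone]
    by_cases hi : a.foldl PySem.Int.bxor 0 = i
    · rw [if_pos ((bxor_eq_zero_iff _ _).mpr hi)]
      simp [hi]
    · rw [if_neg (fun hz => hi ((bxor_eq_zero_iff _ _).mp hz)), ih]
      simp [List.mem_cons, hi]

-- ===== VERDICT (by name: the statement is the Claim_ definition above) =====
theorem solve_spec : Claim_equal_solve := by
  intro a _
  unfold Spec_solve solve solve_alt
  by_cases hx : a.foldl (fun r num => PySem.Int.bxor r num) 0 = 0
  · rw [if_pos hx, if_pos hx]
  · rw [if_neg hx, if_neg hx]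
    have hfold : a.foldl (fun r num => PySem.Int.bxor r num) 0 = a.foldl PySem.Int.bxor 0 := rfl
    rw [hfold] at hx ⊢
    rcases Nat.mod_two_eq_zero_or_one a.length with h | h
    · rw [searchA_even a h hx, if_neg (by omega)]
    · rw [searchA_odd a h]
      simp only [PySem.List.mem_pyRange_one]
      by_cases hr : 1 ≤ a.foldl PySem.Int.bxor 0 ∧ a.foldl PySem.Int.bxor 0 < 32
      · rw [if_pos hr, if_pos (show a.length % 2 = 1 ∧ _ ∧ _ from ⟨h, hr.1, by omega⟩)]
      · rw [if_neg hr, if_neg (by omega)]
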